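-- pv_equiv track=rewrite | github.com/Ollie117/evo2-essentiality | scripts/mutation_size_strategy/generate_mutation_senstitivity_pertubations2.py | insert_stops_at_intervals
-- ===== SOURCE A (Python) =====
-- def insert_stops_at_intervals(sequence: str, offset: int = 12, stop_pattern: str = 'TAA') -> str:
--     """
--     Insert stop codon pattern at regular intervals throughout sequence.
--
--     Args:
--         sequence: DNA sequence (CDS only)
--         offset: Interval between insertions (default: 12bp, as per paper)
--         stop_pattern: Stop codon pattern to insert
--
--     Returns:
--         Sequence with stops inserted at intervals
--     """
--     if len(sequence) < offset:
--         return stop_pattern + sequence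
--
--     mutated = []
--     for i in range(0, len(sequence), offset):
--         mutated.append(stop_pattern)
--         mutated.append(sequence[i:i+offset])
--
--     return ''.join(mutated)
-- ===== SOURCE B (Python) =====
-- def insert_stops_at_intervals(sequence: str, offset: int = 12, stop_pattern: str = 'TAA') -> str:
--     """Insert stop codon pattern at regular intervals throughout sequence."""
--     out = stop_pattern
--     while len(sequence) > offset:
--         out += sequence[:offset] + stop_pattern
--         sequence = sequence[offset:]
--     return out + sequence
-- ===== Notes on version B (the rewrite author's own statement) =====
-- stated objective: simpler
-- what changed: B replaces A's index loop over range(0, len, offset) that interleaves a 2N-element list and joins it with a guard for short sequences by a guard-free while loop that consumes the sequence offset characters at a time into a string accumulator seeded with stop_pattern.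
-- outside the precondition, e.g. on insert_stops_at_intervals('A', -2, 'TAA'): A returns '', B does not finish within the time limit; on insert_stops_at_intervals('A', 0, 'TAA'): A raises ValueError, B does not finish within the time limit
import Mathlib
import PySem

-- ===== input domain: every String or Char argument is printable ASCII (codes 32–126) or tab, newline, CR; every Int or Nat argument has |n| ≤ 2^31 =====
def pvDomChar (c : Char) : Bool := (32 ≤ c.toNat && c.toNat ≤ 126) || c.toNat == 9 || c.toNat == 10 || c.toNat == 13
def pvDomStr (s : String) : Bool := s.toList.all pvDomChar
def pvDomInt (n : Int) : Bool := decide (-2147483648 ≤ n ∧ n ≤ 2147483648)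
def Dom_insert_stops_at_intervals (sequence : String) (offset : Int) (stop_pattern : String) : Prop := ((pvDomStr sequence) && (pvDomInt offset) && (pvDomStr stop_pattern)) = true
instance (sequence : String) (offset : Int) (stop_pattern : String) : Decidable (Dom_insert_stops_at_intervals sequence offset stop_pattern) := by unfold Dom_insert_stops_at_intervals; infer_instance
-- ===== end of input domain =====

-- B rewrites A's range-indexed interleaved-list-and-join (with its short-sequence guard) as a
-- guard-free while loop that consumes the sequence offset characters at a time into a string
-- accumulator seeded with stop_pattern; equivalence is proved for positive offset (Pre_).

-- ===== PORT A =====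
-- Works on .toList / String.ofList (Python str ↔ list of code points); ''.join(mutated) is .flatten.
def insert_stops_at_intervals (sequence : String) (offset : Int) (stop_pattern : String) : String :=
  let s := sequence.toList
  let p := stop_pattern.toList
  if (s.length : Int) < offset then String.ofList (p ++ s)   -- return stop_pattern + sequence
  else
    -- mutated = []; for i in range(0, len(sequence), offset): mutated.append(stop_pattern); mutated.append(sequence[i:i+offset])
    let mutated : List (List Char) :=
      (PySem.List.pyRange 0 (s.length : Int) offset).foldl
        (fun acc i => acc ++ [p, PySem.List.slice s (some i) (some (i + offset))]) []
    String.ofList mutated.flatten                            -- return ''.join(mutated)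

-- ===== PORT B =====
-- the while loop of Source B; fuel = len(sequence) only makes the recursion total: with offset > 0 the
-- sequence shrinks by offset ≥ 1 each pass, so the fuel is never exhausted inside Pre_.
def pvAltLoop (fuel : Nat) (out : List Char) (s : List Char) (offset : Int) (p : List Char) : List Char :=
  match fuel with
  | 0 => out ++ s
  | fuel + 1 =>
    if (s.length : Int) > offset then
      pvAltLoop fuel (out ++ PySem.List.slice s none (some offset) ++ p)
        (PySem.List.slice s (some offset) none) offset p
    else out ++ s                                            -- return out + sequence

def insert_stops_at_intervals_alt (sequence : String) (offset : Int) (stop_pattern : String) : String :=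
  String.ofList (pvAltLoop sequence.toList.length stop_pattern.toList sequence.toList offset stop_pattern.toList)

-- ===== PRECONDITION & SPEC =====
-- Pre_ excludes non-positive offsets: at offset 0 A raises ValueError (range step 0), and for
-- negative offsets A's '' (range(0, len, neg) is empty) is an artefact of range semantics while
-- B's while loop does not terminate there.
def Pre_insert_stops_at_intervals (sequence : String) (offset : Int) (stop_pattern : String) : Prop := 0 < offset
instance (sequence : String) (offset : Int) (stop_pattern : String) : Decidable (Pre_insert_stops_at_intervals sequence offset stop_pattern) := by unfold Pre_insert_stops_at_intervals; infer_instance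
def pvWitness_insert_stops_at_intervals : String × Int × String := ("ACGTACGTAC", 3, "TAA")
def Spec_insert_stops_at_intervals (sequence : String) (offset : Int) (stop_pattern : String) (out : String) : Prop := out = insert_stops_at_intervals_alt sequence offset stop_pattern
instance (sequence : String) (offset : Int) (stop_pattern : String) (out : String) : Decidable (Spec_insert_stops_at_intervals sequence offset stop_pattern out) := by unfold Spec_insert_stops_at_intervals; infer_instance

-- ===== CLAIM (what is proved, stated in full; the proofs are below) =====
def Claim_equal_insert_stops_at_intervals : Prop := ∀ (sequence : String) (offset : Int) (stop_pattern : String), Dom_insert_stops_at_intervals sequence offset stop_pattern → Pre_insert_stops_at_intervals sequence offset stop_pattern → Spec_insert_stops_at_intervals sequence offset stop_pattern (insert_stops_at_intervals sequence offset stop_pattern)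

-- ===== LEMMAS AND PROOFS =====

-- what B's loop computes after the seed: chunks of off separated by p (trailing short chunk kept)
def pvG (p : List Char) (off : Nat) (s : List Char) : List Char :=
  if _h : off = 0 ∨ s.length ≤ off then s
  else s.take off ++ p ++ pvG p off (s.drop off)
termination_by s.length
decreasing_by simp_all; omega

-- what A's loop computes: p before every chunk
def pvH (p : List Char) (off : Nat) (s : List Char) : List Char :=
  if _h : off = 0 ∨ s = [] then []
  else p ++ s.take off ++ pvH p off (s.drop off)
termination_by s.length
decreasing_by
  simp only [not_or] at *
  have := List.length_pos_of_ne_nil (by tauto : s ≠ [])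
  simp; omega

theorem pvRange_pos_nil (a b st : Int) (hst : 0 < st) (h : b ≤ a) :
    PySem.List.pyRange a b st = [] := by
  rw [PySem.List.pyRange_of_pos a b hst, if_neg (by omega)]; simp

theorem pvRange_pos_cons (a b st : Int) (hst : 0 < st) (h : a < b) :
    PySem.List.pyRange a b st = a :: PySem.List.pyRange (a + st) b st := by
  rw [PySem.List.pyRange_of_pos a b hst, PySem.List.pyRange_of_pos (a + st) b hst, if_pos h]
  by_cases h2 : a + st < b
  · rw [if_pos h2]
    have hdiv : (b - a + st - 1) / st = (b - (a + st) + st - 1) / st + 1 := by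
      have : b - a + st - 1 = (b - (a + st) + st - 1) + 1 * st := by ring
      rw [this, Int.add_mul_ediv_right _ _ (by omega)]
    have hq : 0 ≤ (b - (a + st) + st - 1) / st := Int.ediv_nonneg (by omega) (by omega)
    rw [hdiv]
    have : ((b - (a + st) + st - 1) / st + 1).toNat = ((b - (a + st) + st - 1) / st).toNat + 1 := by
      omega
    rw [this, List.range_succ_eq_map]
    simp only [List.map_cons, List.map_map, List.cons.injEq]
    refine ⟨by simp, ?_⟩
    apply List.map_congr_left; intro k _; simp [Function.comp]; ring
  · rw [if_neg h2]
    have hdiv : (b - a + st - 1) / st = 1 := by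
      have h1 : b - a + st - 1 = (b - a - 1) + 1 * st := by ring
      rw [h1, Int.add_mul_ediv_right _ _ (by omega), Int.ediv_eq_zero_of_lt (by omega) (by omega)]
      norm_num
    rw [hdiv]; simp

theorem pvRange_shift (b c st : Int) (hst : 0 < st) :
    PySem.List.pyRange c (b + c) st = (PySem.List.pyRange 0 b st).map (· + c) := by
  rw [PySem.List.pyRange_of_pos c (b + c) hst, PySem.List.pyRange_of_pos 0 b hst]
  have h1 : (c < b + c) = (0 < b) := by simp
  have h2 : b + c - c = b - 0 := by ring
  simp only [h1, h2, List.map_map]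
  apply List.map_congr_left; intro k _; simp [Function.comp]; ring

-- B's loop, given enough fuel, computes out ++ pvG
theorem pvAltLoop_eq (p : List Char) (off : Nat) (hoff : 0 < off) :
    ∀ (fuel : Nat) (s out : List Char), s.length ≤ fuel →
      pvAltLoop fuel out s (off : Int) p = out ++ pvG p off s := by
  intro fuel
  induction fuel with
  | zero =>
    intro s out hs
    have : s = [] := by simpa [List.length_eq_zero_iff] using Nat.le_zero.mp hs
    subst this; simp [pvAltLoop, pvG]
  | succ n ih =>
    intro s out hs
    rw [pvAltLoop]
    by_cases h : (s.length : Int) > (off : Int)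
    · rw [if_pos h]
      have hlen : off < s.length := by exact_mod_cast h
      rw [ih _ _ (by simp; omega)]
      rw [PySem.List.slice_to s (by positivity), PySem.List.slice_from s (by positivity)]
      simp only [Int.toNat_natCast]
      conv_rhs => rw [pvG]
      rw [dif_neg (by omega)]
      simp
    · rw [if_neg h]
      have hlen : s.length ≤ off := by exact_mod_cast not_lt.mp h
      rw [pvG, dif_pos (Or.inr hlen)]

-- pvH with a p glued in front of each chunk is p ++ pvG
theorem pvH_eq (p : List Char) (off : Nat) (hoff : 0 < off) :
    ∀ (s : List Char), s ≠ [] → pvH p off s = p ++ pvG p off s := by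
  suffices H : ∀ (n : Nat) (s : List Char), s.length ≤ n → s ≠ [] → pvH p off s = p ++ pvG p off s by
    intro s; exact H s.length s le_rfl
  intro n
  induction n with
  | zero => intro s hs hne; exact absurd (List.length_eq_zero_iff.mp (Nat.le_zero.mp hs)) hne
  | succ n ih =>
    intro s hs hne
    rw [pvH, dif_neg (by simp [hne]; omega), pvG]
    by_cases h : s.length ≤ off
    · rw [dif_pos (Or.inr h)]
      have hdrop : s.drop off = [] := by simp [List.drop_eq_nil_iff]; omega
      rw [hdrop, pvH, dif_pos (Or.inr rfl)]
      simp [List.take_of_length_le h]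
    · rw [dif_neg (by omega)]
      have hne2 : s.drop off ≠ [] := by simp [List.drop_eq_nil_iff]; omega
      rw [ih _ (by simp; omega) hne2]
      simp

theorem pvFlattenFlatMap {α β : Type} (l : List α) (g : α → List (List β)) :
    (l.flatMap g).flatten = l.flatMap (fun x => (g x).flatten) := by
  induction l with
  | nil => simp
  | cons a t ih => simp [ih]

theorem pvMemRangeNonneg (b st i : Int) (hst : 0 < st) (hi : i ∈ PySem.List.pyRange 0 b st) :
    0 ≤ i := by
  rw [PySem.List.pyRange_of_pos 0 b hst] at hi
  simp at hi
  obtain ⟨k, _, rfl⟩ := hi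
  positivity

-- A's flatMap over range(0, len, off) is pvH
theorem pvCore (p : List Char) (off : Nat) (hoff : 0 < off) :
    ∀ (s : List Char),
      (PySem.List.pyRange 0 (s.length : Int) (off : Int)).flatMap
        (fun i => p ++ PySem.List.slice s (some i) (some (i + (off : Int)))) = pvH p off s := by
  have hst : (0 : Int) < (off : Int) := by exact_mod_cast hoff
  suffices H : ∀ (n : Nat) (s : List Char), s.length ≤ n →
      (PySem.List.pyRange 0 (s.length : Int) (off : Int)).flatMap
        (fun i => p ++ PySem.List.slice s (some i) (some (i + (off : Int)))) = pvH p off s by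
    intro s; exact H s.length s le_rfl
  intro n
  induction n with
  | zero =>
    intro s hs
    have : s = [] := List.length_eq_zero_iff.mp (Nat.le_zero.mp hs)
    subst this
    rw [pvH, dif_pos (Or.inr rfl)]
    simp [pvRange_pos_nil 0 0 _ hst le_rfl]
  | succ n ih =>
    intro s hs
    by_cases hnil : s = []
    · subst hnil
      rw [pvH, dif_pos (Or.inr rfl)]
      simp [pvRange_pos_nil 0 0 _ hst le_rfl]
    · have hpos : 0 < s.length := List.length_pos_of_ne_nil hnil
      rw [pvRange_pos_cons 0 (s.length : Int) _ hst (by exact_mod_cast hpos)]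
      simp only [List.flatMap_cons, zero_add]
      have hsl0 : PySem.List.slice s (some 0) (some ((off : Int))) = s.take off := by
        rw [PySem.List.slice_toNat s le_rfl (by positivity)]
        simp
      have hlen : (s.length : Int) = ((s.length : Int) - (off : Int)) + (off : Int) := by ring
      rw [show PySem.List.pyRange ((off:Int)) (s.length : Int) (off : Int)
            = PySem.List.pyRange (off : Int) (((s.length : Int) - (off : Int)) + (off : Int)) (off : Int) by
          rw [← hlen]]
      rw [pvRange_shift _ _ _ hst, List.flatMap_map]
      by_cases hle : s.length ≤ off
      · have hb : (s.length : Int) - (off : Int) ≤ 0 := by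
          have : (s.length : Int) ≤ (off : Int) := by exact_mod_cast hle
          omega
        rw [pvRange_pos_nil 0 _ _ hst hb]
        rw [pvH, dif_neg (by simp [hnil]; omega)]
        have hdrop : s.drop off = [] := by simp [List.drop_eq_nil_iff]; omega
        rw [hdrop, pvH, dif_pos (Or.inr rfl)]
        simp [hsl0]
      · have hlt : off < s.length := by omega
        have hcongr : (PySem.List.pyRange 0 ((s.length : Int) - (off : Int)) (off : Int)).flatMap
              (fun i => p ++ PySem.List.slice s (some (i + (off : Int))) (some (i + (off : Int) + (off : Int))))
            = (PySem.List.pyRange 0 ((s.length : Int) - (off : Int)) (off : Int)).flatMap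
              (fun i => p ++ PySem.List.slice (s.drop off) (some i) (some (i + (off : Int)))) := by
          apply List.flatMap_congr
          intro i hi
          have h0i : 0 ≤ i := pvMemRangeNonneg _ _ _ hst hi
          rw [PySem.List.slice_toNat s (by omega) (by omega),
              PySem.List.slice_toNat (s.drop off) h0i (by omega)]
          have e1 : ((i + (off:Int)) + (off:Int)).toNat - (i + (off:Int)).toNat
              = (i + (off:Int)).toNat - i.toNat := by omega
          have e2 : (i + (off:Int)).toNat = i.toNat + off := by omega
          rw [List.drop_drop, e1, e2, Nat.add_comm off i.toNat]
        rw [hcongr]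
        have hdlen : ((s.drop off).length : Int) = (s.length : Int) - (off : Int) := by
          simp; omega
        rw [show PySem.List.pyRange 0 ((s.length : Int) - (off : Int)) (off : Int)
              = PySem.List.pyRange 0 (((s.drop off).length : Int)) (off : Int) by rw [hdlen]]
        rw [ih (s.drop off) (by simp; omega)]
        conv_rhs => rw [pvH]
        rw [dif_neg (by simp [hnil]; omega)]
        simp [hsl0]

-- ===== VERDICT (by name: the statement is the Claim_ definition above) =====
theorem insert_stops_at_intervals_spec : Claim_equal_insert_stops_at_intervals := by
  intro sequence offset stop_pattern _hdom hpre
  unfold Spec_insert_stops_at_intervals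
  unfold insert_stops_at_intervals insert_stops_at_intervals_alt
  set s := sequence.toList with hsdef
  set p := stop_pattern.toList with hpdef
  have hoffpos : (0 : Int) < offset := hpre
  set off := offset.toNat with hoffdef
  have hcast : (off : Int) = offset := Int.toNat_of_nonneg (le_of_lt hoffpos)
  have hoff : 0 < off := by omega
  have hB : pvAltLoop s.length p s offset p = p ++ pvG p off s := by
    rw [← hcast]; exact pvAltLoop_eq p off hoff s.length s p le_rfl
  simp only [hB]
  by_cases hshort : (s.length : Int) < offset
  · rw [if_pos hshort]
    have : pvG p off s = s := by
      rw [pvG, dif_pos (Or.inr (by omega))]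
    rw [this]
  · rw [if_neg hshort]
    have hlen : off ≤ s.length := by omega
    have hnil : s ≠ [] := by
      intro h; rw [h] at hlen; simp at hlen; omega
    rw [PySem.List.foldl_append_eq_flatMap, List.nil_append,
        pvFlattenFlatMap]
    rw [← hcast]
    have hflat : (fun i => ([p, PySem.List.slice s (some i) (some (i + (off : Int)))] : List (List Char)).flatten)
        = (fun i => p ++ PySem.List.slice s (some i) (some (i + (off : Int)))) := by
      funext i; simp
    rw [hflat, pvCore p off hoff s, pvH_eq p off hoff s hnil]
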